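-- pv_equiv track=rewrite | github.com/MrBrantCode/unitest_baseline | mut_generate/mist_train_cf/cf_99544/solution.py | find_longest_palindrome
-- ===== SOURCE A (Python) =====
-- def find_longest_palindrome(words, string):
--     longest_palindrome = ''
--     for word in words:
--         if len(word) < len(longest_palindrome):
--             continue
--         for i in range(len(string)):
--             for j in range(i+1, len(string)):
--                 if string[:i] + string[j:] == word and word == word[::-1]:
--                     longest_palindrome = word
--     return longest_palindrome
-- ===== SOURCE B (Python) =====
-- def find_longest_palindrome(words, string):
--     n = len(string)
--     best = ''
--     for word in words:
--         m = len(word)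
--         if m == 0 or m >= n or m < len(best):
--             continue
--         if word != word[::-1]:
--             continue
--         p = 0
--         while p < m - 1 and word[p] == string[p]:
--             p += 1
--         if word[p:] == string[p + n - m:]:
--             best = word
--     return best
-- ===== Notes on version B (the rewrite author's own statement) =====
-- stated objective: faster
-- what changed: A scans all O(L^2) index pairs (i,j) per word and builds/compares an O(L) deleted string for each pair; B decides each word in O(L) with a palindrome check plus a longest-common-prefix and one suffix comparison against the string.
import Mathlib
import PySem

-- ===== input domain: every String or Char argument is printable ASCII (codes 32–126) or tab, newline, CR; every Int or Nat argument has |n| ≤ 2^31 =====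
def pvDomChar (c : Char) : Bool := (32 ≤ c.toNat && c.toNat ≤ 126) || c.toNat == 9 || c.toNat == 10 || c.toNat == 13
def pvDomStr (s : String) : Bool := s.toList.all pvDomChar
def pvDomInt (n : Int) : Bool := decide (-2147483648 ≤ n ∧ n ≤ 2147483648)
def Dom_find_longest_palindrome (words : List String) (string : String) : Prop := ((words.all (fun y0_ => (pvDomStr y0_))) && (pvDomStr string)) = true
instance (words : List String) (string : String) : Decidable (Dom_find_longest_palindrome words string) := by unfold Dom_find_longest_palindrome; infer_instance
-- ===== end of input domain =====

-- B replaces A's cubic-per-word scan over all (i,j) deletion windows by an O(len)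
-- palindrome check plus a longest-common-prefix / suffix comparison per word.

-- ===== PORT A =====
-- literal transliteration of Source A: for each word, skip if shorter than the current
-- best, otherwise scan all index pairs i < j of string and update on a match
def find_longest_palindrome (words : List String) (string : String) : String :=
  words.foldl (fun longest word =>
    if (word.toList.length : Int) < (longest.toList.length : Int) then longest
    else
      (PySem.List.pyRange 0 (PySem.List.len string.toList) 1).foldl (fun acc i =>
        (PySem.List.pyRange (i + 1) (PySem.List.len string.toList) 1).foldl (fun acc2 j =>
          if PySem.List.slice string.toList none (some i) ++ PySem.List.slice string.toList (some j) none = word.toList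
              ∧ PySem.List.slice? word.toList none none (-1) = some word.toList
          then word else acc2) acc) longest) ""

-- ===== PORT B =====
-- the `while p < m-1 and word[p] == string[p]` loop of Source B: count of initial
-- coinciding characters, capped at `cap`
def pvLcp : List Char → List Char → Nat → Nat
  | a :: w, b :: s, cap + 1 => if a = b then pvLcp w s cap + 1 else 0
  | _, _, _ => 0

-- literal transliteration of Source B
def find_longest_palindrome_alt (words : List String) (string : String) : String :=
  let st := string.toList
  let n := st.length
  words.foldl (fun best word =>
    let w := word.toList
    let m := w.length
    if m = 0 ∨ n ≤ m ∨ m < best.toList.length then best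
    else if w ≠ w.reverse then best
    else
      let p := pvLcp w st (m - 1)
      if w.drop p = st.drop (p + (n - m)) then word else best) ""

-- ===== PRECONDITION & SPEC =====
def Spec_find_longest_palindrome (words : List String) (string : String) (out : String) : Prop := out = find_longest_palindrome_alt words string
instance (words : List String) (string : String) (out : String) : Decidable (Spec_find_longest_palindrome words string out) := by unfold Spec_find_longest_palindrome; infer_instance

-- ===== CLAIM (what is proved, stated in full; the proofs are below) =====
def Claim_equal_find_longest_palindrome : Prop := ∀ (words : List String) (string : String), Dom_find_longest_palindrome words string → Spec_find_longest_palindrome words string (find_longest_palindrome words string)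

-- ===== LEMMAS AND PROOFS =====

-- a fold that overwrites the accumulator with the constant c whenever the test holds
lemma foldl_ite_const {α β : Type} (p : β → Prop) [DecidablePred p] (c : α) :
    ∀ (l : List β) (init : α),
      l.foldl (fun a x => if p x then c else a) init = if ∃ x ∈ l, p x then c else init := by
  intro l
  induction l with
  | nil => intro init; simp
  | cons x xs ih =>
    intro init
    by_cases hx : p x
    · simp [hx, ih]
    · simp [hx, ih]

lemma pvLcp_le_cap : ∀ (w s : List Char) (cap : Nat), pvLcp w s cap ≤ cap := by
  intro w
  induction w with
  | nil => intro s cap; cases s <;> cases cap <;> simp [pvLcp]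
  | cons a w ih =>
    intro s cap
    cases s with
    | nil => cases cap <;> simp [pvLcp]
    | cons b s =>
      cases cap with
      | zero => simp [pvLcp]
      | succ cap =>
        simp only [pvLcp]
        split
        · exact Nat.succ_le_succ (ih s cap)
        · exact Nat.zero_le _

lemma pvLcp_take : ∀ (w s : List Char) (cap : Nat),
    w.take (pvLcp w s cap) = s.take (pvLcp w s cap) := by
  intro w
  induction w with
  | nil => intro s cap; cases s <;> cases cap <;> simp [pvLcp]
  | cons a w ih =>
    intro s cap
    cases s with
    | nil => cases cap <;> simp [pvLcp]
    | cons b s =>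
      cases cap with
      | zero => simp [pvLcp]
      | succ cap =>
        simp only [pvLcp]
        split
        · rename_i hab
          simp [hab, ih s cap]
        · simp

lemma le_pvLcp : ∀ (w s : List Char) (cap i : Nat),
    i ≤ cap → i ≤ w.length → w.take i = s.take i → i ≤ pvLcp w s cap := by
  intro w
  induction w with
  | nil =>
    intro s cap i _ hl _
    exact Nat.le_trans (by simpa using hl) (Nat.zero_le _)
  | cons a w ih =>
    intro s cap i hc hl ht
    cases i with
    | zero => exact Nat.zero_le _
    | succ i =>
      cases s with
      | nil => simp at ht
      | cons b s =>
        cases cap with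
        | zero => omega
        | succ cap =>
          simp only [List.take_succ_cons, List.cons.injEq] at ht
          simp only [pvLcp, ht.1]
          exact Nat.succ_le_succ (ih s cap i (by omega) (by simpa using hl) ht.2)

-- the per-word match condition of A, in list form: w is st with a window deleted
def pvExi (w st : List Char) : Prop :=
  ∃ i j : Nat, i < j ∧ j < st.length ∧ st.take i ++ st.drop j = w

-- A finds a deletion window for w in st iff B's prefix/suffix test succeeds
lemma pvExi_iff (w st : List Char) :
    pvExi w st ↔ w.length ≠ 0 ∧ w.length < st.length ∧
      w.drop (pvLcp w st (w.length - 1)) =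
        st.drop (pvLcp w st (w.length - 1) + (st.length - w.length)) := by
  constructor
  · rintro ⟨i, j, hij, hjn, he⟩
    have hlen : i + (st.length - j) = w.length := by
      have := congrArg List.length he
      simp at this
      omega
    have hi_n : i < st.length := by omega
    have hpre : (st.take i).length = i := by simp; omega
    have htake : w.take i = st.take i := by
      have h2 := List.take_left (l₁ := st.take i) (l₂ := st.drop j)
      rw [hpre, he] at h2
      exact h2
    have hdrop : w.drop i = st.drop j := by
      have h2 := List.drop_left (l₁ := st.take i) (l₂ := st.drop j)
      rw [hpre, he] at h2
      exact h2
    have hip : i ≤ pvLcp w st (w.length - 1) :=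
      le_pvLcp w st (w.length - 1) i (by omega) (by omega) htake
    have hpc : pvLcp w st (w.length - 1) ≤ w.length - 1 := pvLcp_le_cap w st (w.length - 1)
    refine ⟨by omega, by omega, ?_⟩
    calc w.drop (pvLcp w st (w.length - 1))
        = (w.drop i).drop (pvLcp w st (w.length - 1) - i) := by
          rw [List.drop_drop]; congr 1; omega
      _ = (st.drop j).drop (pvLcp w st (w.length - 1) - i) := by rw [hdrop]
      _ = st.drop (pvLcp w st (w.length - 1) + (st.length - w.length)) := by
          rw [List.drop_drop]; congr 1; omega
  · rintro ⟨hm0, hmn, hsfx⟩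
    have hpc : pvLcp w st (w.length - 1) ≤ w.length - 1 := pvLcp_le_cap w st (w.length - 1)
    refine ⟨pvLcp w st (w.length - 1), pvLcp w st (w.length - 1) + (st.length - w.length),
      by omega, by omega, ?_⟩
    calc st.take (pvLcp w st (w.length - 1)) ++
          st.drop (pvLcp w st (w.length - 1) + (st.length - w.length))
        = w.take (pvLcp w st (w.length - 1)) ++ w.drop (pvLcp w st (w.length - 1)) := by
          rw [← pvLcp_take w st (w.length - 1), ← hsfx]
      _ = w := List.take_append_drop _ w

-- per-word step functions of the two folds agree
lemma step_eq (st : List Char) (longest word : String) :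
    (if (word.toList.length : Int) < (longest.toList.length : Int) then longest
     else
      (PySem.List.pyRange 0 (PySem.List.len st) 1).foldl (fun acc i =>
        (PySem.List.pyRange (i + 1) (PySem.List.len st) 1).foldl (fun acc2 j =>
          if PySem.List.slice st none (some i) ++ PySem.List.slice st (some j) none = word.toList
              ∧ PySem.List.slice? word.toList none none (-1) = some word.toList
          then word else acc2) acc) longest)
    =
    (let w := word.toList
     let m := w.length
     if m = 0 ∨ st.length ≤ m ∨ m < longest.toList.length then longest
     else if w ≠ w.reverse then longest
     else
      let p := pvLcp w st (m - 1)
      if w.drop p = st.drop (p + (st.length - m)) then word else longest) := by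
  simp only [foldl_ite_const]
  simp only [PySem.List.len_eq]
  have hEx : (∃ i ∈ PySem.List.pyRange 0 (st.length : Int) 1,
      ∃ j ∈ PySem.List.pyRange (i + 1) (st.length : Int) 1,
      PySem.List.slice st none (some i) ++ PySem.List.slice st (some j) none = word.toList ∧
      PySem.List.slice? word.toList none none (-1) = some word.toList)
      ↔ (pvExi word.toList st ∧ word.toList.reverse = word.toList) := by
    simp only [PySem.List.mem_pyRange_one, PySem.List.slice?_none_none_neg_one,
      Option.some.injEq]
    constructor
    · rintro ⟨i, ⟨hi0, hin⟩, j, ⟨hij, hjn⟩, he, hr⟩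
      rw [PySem.List.slice_to st hi0, PySem.List.slice_from st (by omega)] at he
      exact ⟨⟨i.toNat, j.toNat, by omega, by omega, he⟩, hr⟩
    · rintro ⟨⟨i, j, hij, hjn, he⟩, hr⟩
      refine ⟨(i : Int), ⟨by omega, by omega⟩, (j : Int), ⟨by omega, by omega⟩, ?_, hr⟩
      rw [PySem.List.slice_to st (by omega), PySem.List.slice_from st (by omega)]
      simpa using he
  by_cases hlb : word.toList.length < longest.toList.length
  · rw [if_pos (by exact_mod_cast hlb),
      if_pos (show word.toList.length = 0 ∨ st.length ≤ word.toList.length ∨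
        word.toList.length < longest.toList.length from by omega)]
  · rw [if_neg (by exact_mod_cast hlb)]
    by_cases hC : ∃ i ∈ PySem.List.pyRange 0 (st.length : Int) 1,
        ∃ j ∈ PySem.List.pyRange (i + 1) (st.length : Int) 1,
        PySem.List.slice st none (some i) ++ PySem.List.slice st (some j) none = word.toList ∧
        PySem.List.slice? word.toList none none (-1) = some word.toList
    · rw [if_pos hC]
      obtain ⟨hx, hr⟩ := hEx.mp hC
      have h3 := (pvExi_iff word.toList st).mp hx
      rw [if_neg (show ¬ (word.toList.length = 0 ∨ st.length ≤ word.toList.length ∨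
          word.toList.length < longest.toList.length) from by omega),
        if_neg (not_ne_iff.mpr hr.symm), if_pos h3.2.2]
    · rw [if_neg hC]
      by_cases hdeg : word.toList.length = 0 ∨ st.length ≤ word.toList.length
      · rw [if_pos (show word.toList.length = 0 ∨ st.length ≤ word.toList.length ∨
          word.toList.length < longest.toList.length from by omega)]
      · push Not at hdeg
        rw [if_neg (show ¬ (word.toList.length = 0 ∨ st.length ≤ word.toList.length ∨
          word.toList.length < longest.toList.length) from by omega)]
        by_cases hr : word.toList.reverse = word.toList
        · rw [if_neg (not_ne_iff.mpr hr.symm),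
            if_neg (fun hsfx => hC (hEx.mpr
              ⟨(pvExi_iff word.toList st).mpr ⟨hdeg.1, hdeg.2, hsfx⟩, hr⟩))]
        · rw [if_pos (show word.toList ≠ word.toList.reverse from fun h => hr h.symm)]

lemma fold_eq (st : List Char) : ∀ (ws : List String) (acc : String),
    ws.foldl (fun longest word =>
      if (word.toList.length : Int) < (longest.toList.length : Int) then longest
      else
        (PySem.List.pyRange 0 (PySem.List.len st) 1).foldl (fun acc i =>
          (PySem.List.pyRange (i + 1) (PySem.List.len st) 1).foldl (fun acc2 j =>
            if PySem.List.slice st none (some i) ++ PySem.List.slice st (some j) none = word.toList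
                ∧ PySem.List.slice? word.toList none none (-1) = some word.toList
            then word else acc2) acc) longest) acc
    =
    ws.foldl (fun best word =>
      let w := word.toList
      let m := w.length
      if m = 0 ∨ st.length ≤ m ∨ m < best.toList.length then best
      else if w ≠ w.reverse then best
      else
        let p := pvLcp w st (m - 1)
        if w.drop p = st.drop (p + (st.length - m)) then word else best) acc := by
  intro ws
  induction ws with
  | nil => intro acc; rfl
  | cons word ws ih =>
    intro acc
    simp only [List.foldl_cons]
    rw [step_eq st acc word]
    exact ih _

-- ===== VERDICT (by name: the statement is the Claim_ definition above) =====
theorem find_longest_palindrome_spec : Claim_equal_find_longest_palindrome := by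
  intro words string _
  unfold Spec_find_longest_palindrome find_longest_palindrome find_longest_palindrome_alt
  exact fold_eq string.toList words ""
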